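-- pv_equiv track=rewrite | github.com/Karanraj-6/JobHunt | caption_generator.py | _clean_caption
-- ===== SOURCE A (Python) =====
-- def _clean_caption(caption: str) -> str:
--     """Clean and format the generated caption."""
--     # Remove extra whitespace
--     caption = ' '.join(caption.split())
--
--     # Ensure hashtags are properly formatted
--     lines = caption.split('\n')
--     cleaned_lines = []
--
--     for line in lines:
--         line = line.strip()
--         if line:
--             # Ensure hashtags start with #
--             if line.startswith('hashtag') or line.startswith('tag'):
--                 line = '#' + line[7:] if line.startswith('hashtag') else '#' + line[3:]
--             elif not line.startswith('#') and any(word in line.lower() for word in ['python', 'ml', 'ai', 'data']):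
--                 # Add # to relevant keywords that should be hashtags
--                 line = '#' + line
--
--             cleaned_lines.append(line)
--
--     return '\n'.join(cleaned_lines)
-- ===== SOURCE B (Python) =====
-- def _clean_caption(caption: str) -> str:
--     """Clean and format the generated caption (flat: the whitespace collapse
--     leaves at most one line, so no loop is needed)."""
--     s = ' '.join(caption.split())
--     if not s:
--         return ''
--     if s.startswith('hashtag'):
--         return '#' + s[7:]
--     if s.startswith('tag'):
--         return '#' + s[3:]
--     if not s.startswith('#') and any(w in s.lower() for w in ('python', 'ml', 'ai', 'data')):
--         return '#' + s
--     return s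
-- ===== Notes on version B (the rewrite author's own statement) =====
-- stated objective: simpler
-- what changed: B exploits that the whitespace collapse removes all newlines, so the split-into-lines/strip/accumulate/join loop of A disappears: B is one flat early-return chain over the single collapsed string.
import Mathlib
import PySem

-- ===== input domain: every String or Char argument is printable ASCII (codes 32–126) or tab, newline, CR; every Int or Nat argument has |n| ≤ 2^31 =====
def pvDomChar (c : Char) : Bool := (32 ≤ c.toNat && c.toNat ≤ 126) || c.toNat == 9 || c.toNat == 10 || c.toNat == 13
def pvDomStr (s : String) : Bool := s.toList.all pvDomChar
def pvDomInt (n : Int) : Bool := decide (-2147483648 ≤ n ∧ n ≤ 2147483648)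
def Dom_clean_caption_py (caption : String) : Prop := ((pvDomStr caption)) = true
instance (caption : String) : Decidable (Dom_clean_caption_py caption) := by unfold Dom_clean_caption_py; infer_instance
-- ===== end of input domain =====

-- B is simpler: the whitespace collapse removes all newlines, so A's line loop always sees one line;
-- B is a flat early-return chain. Ports work on List Char via PySem.Chars (the PySem definitions).

-- ===== PORT A =====
-- the per-line hashtag transform of A's loop body (branch order as in A)
def pvLineA (line : List Char) : List Char :=
  if PySem.Chars.startswith line "hashtag".toList || PySem.Chars.startswith line "tag".toList then
    (if PySem.Chars.startswith line "hashtag".toList then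
       '#' :: PySem.Chars.slice line (some 7) none
     else
       '#' :: PySem.Chars.slice line (some 3) none)
  else if !PySem.Chars.startswith line "#".toList &&
          (["python", "ml", "ai", "data"].any
            (fun w => PySem.Chars.isIn w.toList (PySem.Chars.lower line))) then
    '#' :: line
  else
    line

def clean_caption_py (caption : String) : String :=
  let cap := PySem.Chars.join [' '] (PySem.Chars.split₀ caption.toList)
  let lines := PySem.Chars.splitOn cap ['\n']
  let cleaned_lines := lines.foldl (fun acc line =>
    let line := PySem.Chars.strip line
    if line.isEmpty then acc else acc ++ [pvLineA line]) []
  String.mk (PySem.Chars.join ['\n'] cleaned_lines)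

-- ===== PORT B =====
def clean_caption_py_alt (caption : String) : String :=
  let s := PySem.Chars.join [' '] (PySem.Chars.split₀ caption.toList)
  if s.isEmpty then ""
  else if PySem.Chars.startswith s "hashtag".toList then
    String.mk ('#' :: PySem.Chars.slice s (some 7) none)
  else if PySem.Chars.startswith s "tag".toList then
    String.mk ('#' :: PySem.Chars.slice s (some 3) none)
  else if !PySem.Chars.startswith s "#".toList &&
          (["python", "ml", "ai", "data"].any
            (fun w => PySem.Chars.isIn w.toList (PySem.Chars.lower s))) then
    String.mk ('#' :: s)
  else
    String.mk s

-- ===== PRECONDITION & SPEC =====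
def Spec_clean_caption_py (caption : String) (out : String) : Prop := out = clean_caption_py_alt caption
instance (caption : String) (out : String) : Decidable (Spec_clean_caption_py caption out) := by unfold Spec_clean_caption_py; infer_instance

-- ===== CLAIM (what is proved, stated in full; the proofs are below) =====
def Claim_equal_clean_caption_py : Prop := ∀ (caption : String), Dom_clean_caption_py caption → Spec_clean_caption_py caption (clean_caption_py caption)

-- ===== LEMMAS AND PROOFS =====

-- every word produced by split₀ is nonempty and contains no whitespace character
theorem pv_split0_go_words (cs : List Char) : ∀ (cur : List Char) (acc : List (List Char)),
    (∀ w ∈ acc, w ≠ [] ∧ ∀ c ∈ w, PySem.Chars.isspace c = false) →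
    (∀ c ∈ cur, PySem.Chars.isspace c = false) →
    ∀ w ∈ PySem.Chars.split₀.go cs cur acc, w ≠ [] ∧ ∀ c ∈ w, PySem.Chars.isspace c = false := by
  induction cs with
  | nil =>
    intro cur acc hacc hcur w hw
    by_cases h : cur.isEmpty
    · simp only [PySem.Chars.split₀.go, h, if_true, List.mem_reverse] at hw
      exact hacc w hw
    · simp only [PySem.Chars.split₀.go, h, Bool.false_eq_true, if_false, List.mem_reverse,
        List.mem_cons] at hw
      rcases hw with hw | hw
      · subst hw
        refine ⟨by simpa [List.isEmpty_iff] using h, ?_⟩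
        intro c hc; exact hcur c (List.mem_reverse.mp hc)
      · exact hacc w hw
  | cons c rest ih =>
    intro cur acc hacc hcur w hw
    by_cases hs : PySem.Chars.isspace c
    · by_cases hc : cur.isEmpty
      · simp only [PySem.Chars.split₀.go, hs, hc, if_true] at hw
        exact ih [] acc hacc (by simp) w hw
      · simp only [PySem.Chars.split₀.go, hs, hc, Bool.false_eq_true, if_false, if_true] at hw
        refine ih [] (cur.reverse :: acc) ?_ (by simp) w hw
        intro v hv
        rcases List.mem_cons.mp hv with hv | hv
        · subst hv
          refine ⟨by simpa [List.isEmpty_iff] using hc, ?_⟩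
          intro d hd; exact hcur d (List.mem_reverse.mp hd)
        · exact hacc v hv
    · simp only [PySem.Chars.split₀.go, hs, Bool.false_eq_true, if_false] at hw
      refine ih (c :: cur) acc hacc ?_ w hw
      intro d hd
      rcases List.mem_cons.mp hd with hd | hd
      · subst hd; simpa using hs
      · exact hcur d hd

theorem pv_split0_words (cs : List Char) :
    ∀ w ∈ PySem.Chars.split₀ cs, w ≠ [] ∧ ∀ c ∈ w, PySem.Chars.isspace c = false := by
  simpa [PySem.Chars.split₀] using pv_split0_go_words cs [] [] (by simp) (by simp)

-- every character of ' '.join(parts) is a space or a character of some part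
theorem pv_mem_join (parts : List (List Char)) (c : Char)
    (hc : c ∈ PySem.Chars.join [' '] parts) : c = ' ' ∨ ∃ w ∈ parts, c ∈ w := by
  induction parts with
  | nil => simp [PySem.Chars.join_nil] at hc
  | cons p rest ih =>
    cases rest with
    | nil =>
      rw [PySem.Chars.join_singleton] at hc
      exact Or.inr ⟨p, by simp, hc⟩
    | cons q r =>
      rw [PySem.Chars.join_cons_cons] at hc
      simp only [List.mem_append, List.mem_singleton] at hc
      rcases hc with (hc | hc) | hc
      · exact Or.inr ⟨p, by simp, hc⟩
      · exact Or.inl hc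
      · rcases ih hc with h | ⟨w, hw, hcw⟩
        · exact Or.inl h
        · exact Or.inr ⟨w, by simp [hw], hcw⟩

-- splitOn a separator-free string yields the whole string
theorem pv_splitOn_go_free (l : List Char) : ∀ (fuel : Nat) (cur : List Char) (acc : List (List Char)),
    l.length < fuel → '\n' ∉ l →
    PySem.Chars.splitOn.go ['\n'] fuel l cur acc = ((cur.reverse ++ l) :: acc).reverse := by
  induction l with
  | nil =>
    intro fuel cur acc hf _
    match fuel, hf with
    | fuel + 1, _ => simp [PySem.Chars.splitOn.go]
  | cons c rest ih =>
    intro fuel cur acc hf hn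
    match fuel, hf with
    | fuel + 1, hf =>
      have hpre : List.isPrefixOf ['\n'] (c :: rest) = false := by
        simp only [List.isPrefixOf, Bool.and_eq_false_iff, beq_eq_false_iff_ne, ne_eq]
        left
        intro h
        exact hn (by simp only [List.mem_cons]; exact Or.inl h)
      rw [PySem.Chars.splitOn.go]
      simp only [hpre, Bool.false_eq_true, if_false]
      rw [ih fuel (c :: cur) acc (by simpa using Nat.lt_of_succ_lt_succ hf)
          (fun h => hn (List.mem_cons_of_mem _ h))]
      simp

theorem pv_splitOn_free (s : List Char) (hn : '\n' ∉ s) :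
    PySem.Chars.splitOn s ['\n'] = [s] := by
  rw [PySem.Chars.splitOn, pv_splitOn_go_free s (s.length + 1) [] [] (by omega) hn]
  simp

-- a list all of whose characters are non-space is dropWhile-fixed
theorem pv_dropWhile_nospace (l : List Char)
    (h : ∀ c ∈ l, PySem.Chars.isspace c = false) :
    List.dropWhile PySem.Chars.isspace l = l := by
  cases l with
  | nil => rfl
  | cons c t => simp [h c (by simp)]

-- join of a nonempty head word is nonempty
theorem pv_join_ne (p : List Char) (rest : List (List Char)) (hp : p ≠ []) :
    PySem.Chars.join [' '] (p :: rest) ≠ [] := by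
  cases rest with
  | nil => rw [PySem.Chars.join_singleton]; exact hp
  | cons q r => rw [PySem.Chars.join_cons_cons]; simp [hp]

-- strip fixes ' '.join of nonempty, space-free words
theorem pv_strip_join (parts : List (List Char))
    (hp : ∀ w ∈ parts, w ≠ [] ∧ ∀ c ∈ w, PySem.Chars.isspace c = false) :
    PySem.Chars.strip (PySem.Chars.join [' '] parts) = PySem.Chars.join [' '] parts := by
  induction parts with
  | nil => simp [PySem.Chars.join_nil, PySem.Chars.strip, PySem.Chars.lstrip, PySem.Chars.rstrip]
  | cons p rest ih =>
    cases rest with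
    | nil =>
      rw [PySem.Chars.join_singleton]
      obtain ⟨hne, hsp⟩ := hp p (by simp)
      simp only [PySem.Chars.strip, PySem.Chars.lstrip, PySem.Chars.rstrip]
      rw [pv_dropWhile_nospace p hsp,
          pv_dropWhile_nospace p.reverse (fun c hc => hsp c (List.mem_reverse.mp hc))]
      simp
    | cons q r =>
      have hrest : ∀ w ∈ q :: r, w ≠ [] ∧ ∀ c ∈ w, PySem.Chars.isspace c = false :=
        fun w hw => hp w (by simp [hw])
      have ihr := ih hrest
      obtain ⟨hpne, hpsp⟩ := hp p (by simp)
      obtain ⟨hqne, _⟩ := hp q (by simp)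
      set J := PySem.Chars.join [' '] (q :: r) with hJ
      have hjne : J ≠ [] := pv_join_ne q r hqne
      -- from ihr, both one-sided strips fix J
      have hlstr : PySem.Chars.lstrip J = J := by
        have hsuf : PySem.Chars.lstrip J <:+ J := by
          simp only [PySem.Chars.lstrip]; exact List.dropWhile_suffix _
        apply hsuf.eq_of_length
        have h1 : (PySem.Chars.rstrip (PySem.Chars.lstrip J)).length
            ≤ (PySem.Chars.lstrip J).length := by
          simp only [PySem.Chars.rstrip, List.length_reverse]
          exact (List.length_dropWhile_le _ _).trans (by simp)
        have h2 : (PySem.Chars.lstrip J).length ≤ J.length := by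
          simp only [PySem.Chars.lstrip]; exact List.length_dropWhile_le _ _
        have h3 := congrArg List.length ihr
        simp only [PySem.Chars.strip] at h3
        omega
      have hrstr : PySem.Chars.rstrip J = J := by
        have h4 := ihr
        simp only [PySem.Chars.strip, hlstr] at h4
        exact h4
      have hrfix : List.dropWhile PySem.Chars.isspace J.reverse = J.reverse := by
        have h5 := congrArg List.reverse hrstr
        simp only [PySem.Chars.rstrip, List.reverse_reverse] at h5
        exact h5
      rw [PySem.Chars.join_cons_cons, ← hJ]
      -- lstrip: p starts with a non-space character
      have hl : PySem.Chars.lstrip (p ++ [' '] ++ J) = p ++ [' '] ++ J := by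
        cases p with
        | nil => exact absurd rfl hpne
        | cons c t =>
          have hcs : PySem.Chars.isspace c = false := hpsp c (by simp)
          simp [PySem.Chars.lstrip, hcs]
      simp only [PySem.Chars.strip, hl, PySem.Chars.rstrip, List.reverse_append,
        List.dropWhile_append, hrfix]
      have hne2 : J.reverse.isEmpty = false := by simp [hjne]
      simp [hne2]

-- the collapsed caption contains no newline
theorem pv_no_newline (cs : List Char) :
    '\n' ∉ PySem.Chars.join [' '] (PySem.Chars.split₀ cs) := by
  intro h
  rcases pv_mem_join _ _ h with h | ⟨w, hw, hcw⟩
  · exact absurd h (by decide)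
  · have := (pv_split0_words cs w hw).2 '\n' hcw
    exact absurd this (by decide)

-- ===== VERDICT (by name: the statement is the Claim_ definition above) =====
theorem clean_caption_py_spec : Claim_equal_clean_caption_py := by
  intro caption _
  simp only [Spec_clean_caption_py, clean_caption_py, clean_caption_py_alt]
  set s := PySem.Chars.join [' '] (PySem.Chars.split₀ caption.toList) with hs
  have hstrip : PySem.Chars.strip s = s := pv_strip_join _ (pv_split0_words caption.toList)
  rw [pv_splitOn_free s (pv_no_newline caption.toList)]
  simp only [List.foldl_cons, List.foldl_nil, hstrip]
  by_cases he : s.isEmpty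
  · simp only [he, if_true, PySem.Chars.join_nil]
    rfl
  · simp only [he, Bool.false_eq_true, if_false, List.nil_append, PySem.Chars.join_singleton]
    unfold pvLineA
    split_ifs <;> simp_all
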